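-- pv_equiv track=rewrite | github.com/juraxis/trade-law | plugins/trade-law/scripts/hts-hierarchy-builder.py | extract_heading_entries
-- ===== SOURCE A (Python) =====
-- def extract_heading_entries(data: list[dict], heading: str) -> list[dict]:
--     """
--     Extract all entries under a given heading prefix.
--
--     The heading can be:
--       - 4-digit: "8471" → matches 8471.xx.xx
--       - 6-digit: "8471.60" → matches 8471.60.xx
--       - Any prefix of an HTS number
--     """
--     # Normalize: remove dots for matching
--     heading_clean = heading.replace(".", "")
--
--     results = []
--     in_scope = False
--
--     for entry in data:
--         htsno = entry.get("htsno", "")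
--         htsno_clean = htsno.replace(".", "")
--         is_superior = entry.get("superior") in (True, "true", "True")
--
--         if htsno_clean.startswith(heading_clean):
--             in_scope = True
--             results.append(entry)
--         elif in_scope and not htsno and is_superior:
--             # Superior (grouping header) entries within the heading range
--             results.append(entry)
--         elif in_scope and htsno and not htsno_clean.startswith(heading_clean):
--             # We've moved past the heading
--             break
--         elif in_scope and not htsno and not is_superior:
--             # Descriptive entries within the heading
--             results.append(entry)
--
--     return results
-- ===== SOURCE B (Python) =====
-- def extract_heading_entries(data: list[dict], heading: str) -> list[dict]:
--     # Index-and-slice formulation: compute the first matching index and the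
--     # first break index after it, then return the slice directly; no
--     # accumulator, no in_scope flag, and no is_superior computation (empty
--     # htsno entries inside the range are kept regardless of the flag).
--     prefix = heading.replace(".", "")
--     n = len(data)
--     start = next((i for i, e in enumerate(data)
--                   if e.get("htsno", "").replace(".", "").startswith(prefix)), n)
--     stop = next((i for i, e in enumerate(data)
--                  if i > start and e.get("htsno", "")
--                  and not e.get("htsno", "").replace(".", "").startswith(prefix)), n)
--     return data[start:stop]
-- ===== Notes on version B (the rewrite author's own statement) =====
-- stated objective: alternative
-- what changed: A's single stateful accumulator loop with an in_scope flag and a four-way branch is replaced by an index computation: find the first matching index and the first break index after it with two next(...) generator searches over enumerate(data), and return the slice data[start:stop]; the is_superior computation is dropped since it never affects the result.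
import Mathlib
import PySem

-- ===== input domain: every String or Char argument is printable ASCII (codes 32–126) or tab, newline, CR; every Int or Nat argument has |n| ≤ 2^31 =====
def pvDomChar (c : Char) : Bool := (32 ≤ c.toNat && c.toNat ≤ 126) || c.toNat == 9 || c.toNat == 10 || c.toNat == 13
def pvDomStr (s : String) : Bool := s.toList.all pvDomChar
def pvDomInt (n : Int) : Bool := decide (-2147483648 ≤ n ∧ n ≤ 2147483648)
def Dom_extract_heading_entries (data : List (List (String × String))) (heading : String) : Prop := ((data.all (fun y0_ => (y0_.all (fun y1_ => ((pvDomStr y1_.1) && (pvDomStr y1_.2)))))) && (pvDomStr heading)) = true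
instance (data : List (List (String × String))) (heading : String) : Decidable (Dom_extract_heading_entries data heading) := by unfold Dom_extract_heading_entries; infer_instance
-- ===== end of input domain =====

-- B replaces A's stateful accumulator loop (in_scope flag, four-way branch) by an
-- index computation: first matching index, first break index after it, one slice.

-- ===== PORT A =====
-- A's for-loop with its in_scope flag; break = return [], continue = recurse.
def ehaLoop (hc : String) : List (List (String × String)) → Bool → List (List (String × String))
  | [], _ => []
  | entry :: rest, in_scope =>
    let d := PySem.Dict.ofList entry
    let htsno := d.getD "htsno" ""
    let htsno_clean := PySem.Str.replace htsno "." ""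
    let is_superior := (d.get? "superior" == some "true") || (d.get? "superior" == some "True")
    if PySem.Str.startswith htsno_clean hc then
      entry :: ehaLoop hc rest true
    else if in_scope && (htsno == "") && is_superior then
      entry :: ehaLoop hc rest in_scope
    else if in_scope && !(htsno == "") && !(PySem.Str.startswith htsno_clean hc) then
      []  -- break
    else if in_scope && (htsno == "") && !is_superior then
      entry :: ehaLoop hc rest in_scope
    else
      ehaLoop hc rest in_scope

def extract_heading_entries (data : List (List (String × String))) (heading : String) : List (List (String × String)) :=
  let heading_clean := PySem.Str.replace heading "." ""
  ehaLoop heading_clean data false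

-- ===== PORT B =====
-- next((i for i, e in enumerate(data) if <cond>), n): first index whose pair
-- satisfies the predicate, none if the generator is exhausted.
def ehbFirst (p : Int × List (String × String) → Bool) : List (Int × List (String × String)) → Option Int
  | [] => none
  | x :: rest => if p x then some x.1 else ehbFirst p rest

def extract_heading_entries_alt (data : List (List (String × String))) (heading : String) : List (List (String × String)) :=
  let pfx := PySem.Str.replace heading "." ""
  let n : Int := data.length
  let start := (ehbFirst (fun ie =>
      PySem.Str.startswith (PySem.Str.replace ((PySem.Dict.ofList ie.2).getD "htsno" "") "." "") pfx)
      (PySem.List.enumerate data 0)).getD n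
  let stop := (ehbFirst (fun ie =>
      decide (start < ie.1) && !((PySem.Dict.ofList ie.2).getD "htsno" "" == "") &&
        !(PySem.Str.startswith (PySem.Str.replace ((PySem.Dict.ofList ie.2).getD "htsno" "") "." "") pfx))
      (PySem.List.enumerate data 0)).getD n
  PySem.List.slice data (some start) (some stop)

-- ===== PRECONDITION & SPEC =====
def Spec_extract_heading_entries (data : List (List (String × String))) (heading : String) (out : List (List (String × String))) : Prop := out = extract_heading_entries_alt data heading
instance (data : List (List (String × String))) (heading : String) (out : List (List (String × String))) : Decidable (Spec_extract_heading_entries data heading out) := by unfold Spec_extract_heading_entries; infer_instance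

-- ===== CLAIM (what is proved, stated in full; the proofs are below) =====
def Claim_equal_extract_heading_entries : Prop := ∀ (data : List (List (String × String))) (heading : String), Dom_extract_heading_entries data heading → Spec_extract_heading_entries data heading (extract_heading_entries data heading)

-- ===== LEMMAS AND PROOFS =====

-- entry matches the cleaned prefix / entry breaks the scan (nonempty, non-matching)
def pMtch (pfx : String) (e : List (String × String)) : Bool :=
  PySem.Str.startswith (PySem.Str.replace ((PySem.Dict.ofList e).getD "htsno" "") "." "") pfx

def pBrk (pfx : String) (e : List (String × String)) : Bool :=
  !((PySem.Dict.ofList e).getD "htsno" "" == "") && !(pMtch pfx e)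

theorem pMtch_not_pBrk (pfx : String) (e : List (String × String)) (h : pMtch pfx e = true) :
    pBrk pfx e = false := by simp [pBrk, h]

-- ehbFirst over an index-blind predicate is findIdx? shifted by the offset
theorem ehbFirst_blind (q : List (String × String) → Bool) :
    ∀ (l : List (List (String × String))) (s : Int),
      ehbFirst (fun ie => q ie.2) (PySem.List.enumerate l s)
        = (l.findIdx? q).map (fun (k : Nat) => s + (k : Int)) := by
  intro l
  induction l with
  | nil => intro s; simp [ehbFirst, PySem.List.enumerate_nil]
  | cons x xs ih =>
    intro s
    rw [PySem.List.enumerate_cons]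
    by_cases hq : q x = true
    · simp [ehbFirst, hq, List.findIdx?_cons]
    · simp only [ehbFirst, hq]
      simp only [Bool.false_eq_true, if_false, ih (s + 1), List.findIdx?_cons, hq]
      cases List.findIdx? q xs
      · simp
      · simp
        push_cast
        ring

-- with every index above the threshold, the index test is vacuous
theorem ehbFirst_gt (q : List (String × String) → Bool) (t : Int) :
    ∀ (l : List (List (String × String))) (s : Int), t < s →
      ehbFirst (fun ie => decide (t < ie.1) && q ie.2) (PySem.List.enumerate l s)
        = (l.findIdx? q).map (fun (k : Nat) => s + (k : Int)) := by
  intro l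
  induction l with
  | nil => intro s _; simp [ehbFirst, PySem.List.enumerate_nil]
  | cons x xs ih =>
    intro s hs
    rw [PySem.List.enumerate_cons]
    by_cases hq : q x = true
    · simp [ehbFirst, hq, hs, List.findIdx?_cons]
    · simp only [ehbFirst, hq, Bool.and_false, decide_eq_true_eq]
      have : (decide (t < s) && false) = false := by simp
      simp only [Bool.and_false, if_neg (by simp : ¬ (false = true))]
      rw [ih (s + 1) (by omega)]
      simp [List.findIdx?_cons, hq]
      cases List.findIdx? q xs
      · simp
      · simp
        push_cast
        ring

-- with every index at or below the threshold, nothing fires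
theorem ehbFirst_le (q : List (String × String) → Bool) (t : Int) :
    ∀ (l : List (List (String × String))) (s : Int), s + l.length ≤ t + 1 →
      ehbFirst (fun ie => decide (t < ie.1) && q ie.2) (PySem.List.enumerate l s) = none := by
  intro l
  induction l with
  | nil => intro s _; simp [ehbFirst, PySem.List.enumerate_nil]
  | cons x xs ih =>
    intro s hs
    rw [PySem.List.enumerate_cons]
    have hts : ¬ (t < s) := by simp at hs; omega
    simp only [ehbFirst, decide_eq_true_eq, hts, decide_false, Bool.false_and,
      if_neg (by simp : ¬ (false = true))]
    apply ih
    simp at hs ⊢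
    omega

theorem ehbFirst_append (p : Int × List (String × String) → Bool)
    (xs ys : List (Int × List (String × String))) :
    ehbFirst p (xs ++ ys) = (ehbFirst p xs).or (ehbFirst p ys) := by
  induction xs with
  | nil => simp [ehbFirst]
  | cons x xs ih =>
    by_cases hp : p x = true
    · simp [ehbFirst, hp]
    · simp [ehbFirst, hp, ih]

-- A's in-scope loop is "take up to the first break"
theorem ehaLoop_true_take (pfx : String) :
    ∀ (l : List (List (String × String))),
      ehaLoop pfx l true = l.take ((l.findIdx? (pBrk pfx)).getD l.length) := by
  intro l
  induction l with
  | nil => rfl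
  | cons e rest ih =>
    simp only [ehaLoop]
    by_cases hm : pMtch pfx e = true
    · have hb := pMtch_not_pBrk pfx e hm
      simp only [pMtch] at hm
      rw [if_pos hm, List.findIdx?_cons, hb]
      cases h : rest.findIdx? (pBrk pfx) with
      | none => simp [ih, h]
      | some j => simp [ih, h]
    · by_cases hh : (PySem.Dict.ofList e).getD "htsno" "" = ""
      · have hb : pBrk pfx e = false := by simp [pBrk, hh]
        simp only [pMtch] at hm
        rw [if_neg hm, List.findIdx?_cons, hb]
        by_cases hsup : ((PySem.Dict.ofList e).get? "superior" == some "true")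
            || ((PySem.Dict.ofList e).get? "superior" == some "True") = true
        · cases h : rest.findIdx? (pBrk pfx) with
          | none => simp_all [ih]
          | some j => simp_all [ih]
        · cases h : rest.findIdx? (pBrk pfx) with
          | none => simp_all [ih]
          | some j => simp_all [ih]
      · have hb : pBrk pfx e = true := by
          simp [pBrk, pMtch] at hm ⊢
          exact ⟨hh, hm⟩
        have hm2 : PySem.Chars.startswith (PySem.Chars.replace ((PySem.Dict.ofList e).getD "htsno" "").toList ['.'] []) pfx.toList = false := by
          simpa [pMtch] using hm
        simp only [pMtch] at hm
        rw [if_neg hm, List.findIdx?_cons, hb]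
        simp [hh, hm2]

-- A's out-of-scope loop on a matchless list is empty
theorem ehaLoop_false_nomatch (pfx : String) :
    ∀ (l : List (List (String × String))), l.findIdx? (pMtch pfx) = none →
      ehaLoop pfx l false = [] := by
  intro l
  induction l with
  | nil => intro _; rfl
  | cons e rest ih =>
    intro h
    rw [List.findIdx?_cons] at h
    by_cases hm : pMtch pfx e = true
    · simp [hm] at h
    · have hrest : rest.findIdx? (pMtch pfx) = none := by
        simp [hm] at h; simpa using h
      have hm2 : PySem.Chars.startswith (PySem.Chars.replace ((PySem.Dict.ofList e).getD "htsno" "").toList ['.'] []) pfx.toList = false := by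
        simpa [pMtch] using hm
      simp only [ehaLoop]
      simp only [pMtch] at hm
      simp [hm, hm2, ih hrest]

-- the stop index expression, as B computes it once start = k is known
def stopExpr (pfx : String) (data : List (List (String × String))) (k : Nat) : Int :=
  (((data.drop (k + 1)).findIdx? (pBrk pfx)).map (fun (j : Nat) => ((k : Int) + 1 + (j : Int)))).getD data.length

-- main lemma: from the first match onward, the slice equals A's loop
theorem slice_eq_loop (pfx : String) :
    ∀ (data : List (List (String × String))) (k : Nat),
      data.findIdx? (pMtch pfx) = some k →
      PySem.List.slice data (some (k : Int)) (some (stopExpr pfx data k)) = ehaLoop pfx data false := by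
  intro data
  induction data with
  | nil => intro k h; simp [List.findIdx?, List.findIdx?.go] at h
  | cons e rest ih =>
    intro k h
    rw [List.findIdx?_cons] at h
    by_cases hm : pMtch pfx e = true
    · simp only [hm, if_pos] at h
      obtain rfl : k = 0 := by simpa using h.symm
      have hb := pMtch_not_pBrk pfx e hm
      -- left side: e consed onto take of rest up to the first break
      have hstop : stopExpr pfx (e :: rest) 0
          = (((rest.findIdx? (pBrk pfx)).getD rest.length : Nat) : Int) + 1 := by
        unfold stopExpr
        cases hr : rest.findIdx? (pBrk pfx) with
        | none => simp [hr]
        | some j => simp [hr]; push_cast; ring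
      rw [hstop]
      have : ((((rest.findIdx? (pBrk pfx)).getD rest.length : Nat) : Int) + 1)
          = (((((rest.findIdx? (pBrk pfx)).getD rest.length) + 1 : Nat)) : Int) := by push_cast; ring
      rw [this, PySem.List.slice_natCast]
      simp only [Nat.sub_zero, List.drop_zero, List.take_succ_cons]
      -- right side
      simp only [ehaLoop]
      simp only [pMtch] at hm
      rw [if_pos hm, ehaLoop_true_take]
    · simp only [hm, Bool.false_eq_true, if_false] at h
      obtain ⟨k', hk', rfl⟩ : ∃ k', rest.findIdx? (pMtch pfx) = some k' ∧ k = k' + 1 := by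
        cases hr : rest.findIdx? (pMtch pfx) with
        | none => simp [hr] at h
        | some j => refine ⟨j, rfl, ?_⟩; simp [hr] at h; omega
      have hstop : stopExpr pfx (e :: rest) (k' + 1)
          = stopExpr pfx rest k' + 1 := by
        unfold stopExpr
        have hd : (e :: rest).drop (k' + 1 + 1) = rest.drop (k' + 1) := rfl
        rw [hd]
        cases hr : (rest.drop (k' + 1)).findIdx? (pBrk pfx) with
        | none => simp [hr]
        | some j => simp [hr]; push_cast; ring
      have hstopNat : ∃ m : Nat, stopExpr pfx rest k' = (m : Int) := by
        unfold stopExpr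
        cases hr : (rest.drop (k' + 1)).findIdx? (pBrk pfx) with
        | none => exact ⟨rest.length, by simp [hr]⟩
        | some j =>
          refine ⟨k' + 1 + j, ?_⟩
          simp [hr]
      obtain ⟨m, hm'⟩ := hstopNat
      rw [hstop, hm']
      have h2 : ((m : Int) + 1) = (((m + 1 : Nat)) : Int) := by push_cast; ring
      rw [h2, PySem.List.slice_natCast]
      -- left: drop (k'+1) (e::rest) = drop k' rest, take ((m+1)-(k'+1)) = take (m-k')
      simp only [List.drop_succ_cons, Nat.succ_sub_succ]
      rw [← PySem.List.slice_natCast, ← hm']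
      -- right side: A skips e (not matching, flag still false)
      simp only [ehaLoop]
      simp only [pMtch] at hm
      rw [if_neg hm]
      simp only [Bool.false_and, if_neg (by simp : ¬ (false = true))]
      exact ih k' hk'

-- ===== VERDICT (by name: the statement is the Claim_ definition above) =====
theorem extract_heading_entries_spec : Claim_equal_extract_heading_entries := by
  intro data heading _
  unfold Spec_extract_heading_entries extract_heading_entries extract_heading_entries_alt
  set pfx := PySem.Str.replace heading "." "" with hpfx
  dsimp only
  have hstart := ehbFirst_blind (pMtch pfx) data 0
  simp only [pMtch] at hstart
  rw [hstart]
  cases hfi : data.findIdx? (pMtch pfx) with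
  | none =>
    simp only [hfi, Option.map_none, Option.getD_none]
    have hstop := ehbFirst_le (pBrk pfx) ((data.length : Int)) data 0 (by simp)
    simp only [pBrk, pMtch] at hstop
    simp only [Bool.and_assoc]
    have hres : ehaLoop pfx data false
        = PySem.List.slice data (some (data.length : Int)) (some ((none : Option Int).getD (data.length : Int))) := by
      simp only [Option.getD_none]
      rw [PySem.List.slice_natCast]
      simp [ehaLoop_false_nomatch pfx data hfi]
    exact hres.trans (congrArg (fun o : Option Int =>
      PySem.List.slice data (some (data.length : Int)) (some (o.getD (data.length : Int)))) hstop.symm)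
  | some k =>
    simp only [hfi, Option.map_some, Option.getD_some, zero_add]
    have hklen : k < data.length := by
      have := List.findIdx?_eq_some_iff_findIdx_eq.mp hfi
      exact this.1
    have hlen : (data.take (k + 1)).length = k + 1 := by simp; omega
    have hstop : ehbFirst (fun ie => decide ((k : Int) < ie.1) && pBrk pfx ie.2)
        (PySem.List.enumerate data 0)
        = ((data.drop (k + 1)).findIdx? (pBrk pfx)).map (fun (j : Nat) => ((k : Int) + 1 + (j : Int))) := by
      have hsplit : PySem.List.enumerate data 0
          = PySem.List.enumerate (data.take (k + 1)) 0
            ++ PySem.List.enumerate (data.drop (k + 1)) (0 + (data.take (k + 1)).length) := by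
        rw [← PySem.List.enumerate_append, List.take_append_drop]
      rw [hsplit, ehbFirst_append]
      rw [ehbFirst_le (pBrk pfx) (k : Int) (data.take (k + 1)) 0 (by simp [hlen])]
      rw [ehbFirst_gt (pBrk pfx) (k : Int) (data.drop (k + 1)) (0 + (data.take (k + 1)).length) (by rw [hlen]; push_cast; omega)]
      rw [hlen]
      cases (data.drop (k + 1)).findIdx? (pBrk pfx)
      · simp
      · simp
    simp only [pBrk, pMtch] at hstop
    simp only [Bool.and_assoc]
    rw [hstop]
    have hgetD : (((data.drop (k + 1)).findIdx? (pBrk pfx)).map (fun (j : Nat) => ((k : Int) + 1 + (j : Int)))).getD (data.length : Int)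
        = stopExpr pfx data k := by
      unfold stopExpr
      cases hr : (data.drop (k + 1)).findIdx? (pBrk pfx) with
      | none => simp
      | some j => simp
    rw [hgetD]
    exact (slice_eq_loop pfx data k hfi).symm
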